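-- pv_equiv track=rewrite | github.com/eliraneli/Node-Activation | Code/code.py | calculate_edges_CN
-- ===== SOURCE A (Python) =====
-- def calculate_edges_CN(n, var_degrees):
--     d = [[] for _ in range(0, n)]
--     edge = 0
--     for i in range(0, n):
--         for j in range(0, var_degrees[i]):
--             d[i].append(edge)
--             edge += 1
--     return d
-- ===== SOURCE B (Python) =====
-- def calculate_edges_CN(n, var_degrees):
--     # offset-table decomposition: prefix sums of (clamped) degrees give block
--     # boundaries; each node's edge list is one consecutive range slice.
--     offs = [0]
--     for i in range(n):
--         offs.append(offs[-1] + max(0, var_degrees[i]))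
--     return [list(range(offs[i], offs[i + 1])) for i in range(n)]
-- ===== Notes on version B (the rewrite author's own statement) =====
-- stated objective: alternative
-- what changed: Replaces the mutable per-node append loop with a running counter by a precomputed prefix-sum offset table, emitting each node's edges as one consecutive range slice (negative degrees clamp to empty blocks, matching A's never-advancing counter).
import Mathlib
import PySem

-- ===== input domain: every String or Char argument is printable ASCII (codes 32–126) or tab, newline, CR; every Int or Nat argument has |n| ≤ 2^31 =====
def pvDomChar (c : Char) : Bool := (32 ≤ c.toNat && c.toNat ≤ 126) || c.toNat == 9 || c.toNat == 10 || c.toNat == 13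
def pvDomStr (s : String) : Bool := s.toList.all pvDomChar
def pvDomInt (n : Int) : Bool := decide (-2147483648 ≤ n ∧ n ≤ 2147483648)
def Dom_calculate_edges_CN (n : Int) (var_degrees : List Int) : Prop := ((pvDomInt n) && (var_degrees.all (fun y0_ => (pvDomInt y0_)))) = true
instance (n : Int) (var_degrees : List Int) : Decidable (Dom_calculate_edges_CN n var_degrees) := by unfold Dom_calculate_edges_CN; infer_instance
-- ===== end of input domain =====

-- B replaces A's counter-and-append loop by a prefix-sum offset table; chunks are emitted as ranges.
-- Equivalence is about the return value only (neither implementation mutates its arguments).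

-- ===== PORT A =====
def calculate_edges_CN (n : Int) (var_degrees : List Int) : List (List Int) :=
  let d0 := (PySem.List.pyRange 0 n 1).map (fun _ => ([] : List Int))
  let st := (PySem.List.pyRange 0 n 1).foldl
    (fun (st : List (List Int) × Int) i =>
      (PySem.List.pyRange 0 (PySem.List.pyGetD var_degrees i 0) 1).foldl
        (fun st _ =>
          (PySem.List.pySetD st.1 i (PySem.List.pyGetD st.1 i [] ++ [st.2]), st.2 + 1))
        st)
    (d0, 0)
  st.1

-- ===== PORT B =====
def calculate_edges_CN_alt (n : Int) (var_degrees : List Int) : List (List Int) :=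
  let offs := (PySem.List.pyRange 0 n 1).foldl
    (fun (offs : List Int) i =>
      offs ++ [PySem.List.pyGetD offs (-1) 0 + max 0 (PySem.List.pyGetD var_degrees i 0)])
    [0]
  (PySem.List.pyRange 0 n 1).map (fun i =>
    PySem.List.pyRange (PySem.List.pyGetD offs i 0) (PySem.List.pyGetD offs (i + 1) 0) 1)

-- ===== PRECONDITION & SPEC =====
-- A raises IndexError on var_degrees[i] when 0 ≤ n exceeds the list length; those inputs are excluded.
def Pre_calculate_edges_CN (n : Int) (var_degrees : List Int) : Prop :=
  0 ≤ n → n ≤ (var_degrees.length : Int)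
instance (n : Int) (var_degrees : List Int) : Decidable (Pre_calculate_edges_CN n var_degrees) := by
  unfold Pre_calculate_edges_CN; infer_instance

def pvWitness_calculate_edges_CN : Int × List Int := (3, [2, -1, 3])

def Spec_calculate_edges_CN (n : Int) (var_degrees : List Int) (out : List (List Int)) : Prop := out = calculate_edges_CN_alt n var_degrees
instance (n : Int) (var_degrees : List Int) (out : List (List Int)) : Decidable (Spec_calculate_edges_CN n var_degrees out) := by unfold Spec_calculate_edges_CN; infer_instance

-- ===== CLAIM (what is proved, stated in full; the proofs are below) =====
def Claim_equal_calculate_edges_CN : Prop := ∀ (n : Int) (var_degrees : List Int), Dom_calculate_edges_CN n var_degrees → Pre_calculate_edges_CN n var_degrees → Spec_calculate_edges_CN n var_degrees (calculate_edges_CN n var_degrees)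

-- ===== LEMMAS AND PROOFS =====

/-- Clamped degree sum: the number of edges a degree list contributes. -/
def sumMax (ds : List Int) : Int := (ds.map (fun d => max 0 d)).sum

/-- Reference shape: consecutive chunks, one per degree, starting at `e`. -/
def chunksFrom (e : Int) : List Int → List (List Int)
  | [] => []
  | d :: ds => PySem.List.pyRange e (e + max 0 d) 1 :: chunksFrom (e + max 0 d) ds

/-- Offsets after a starting offset `e`, one per degree. -/
def offsetsFrom (e : Int) : List Int → List Int
  | [] => []
  | d :: ds => (e + max 0 d) :: offsetsFrom (e + max 0 d) ds

theorem sumMax_cons (d : Int) (ds : List Int) : sumMax (d :: ds) = max 0 d + sumMax ds := by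
  simp [sumMax]

theorem chunksFrom_eq_map (ds : List Int) : ∀ e : Int,
    chunksFrom e ds = (List.range ds.length).map
      (fun j => PySem.List.pyRange (e + sumMax (ds.take j)) (e + sumMax (ds.take (j + 1))) 1) := by
  induction ds with
  | nil => intro e; simp [chunksFrom]
  | cons d ds ih =>
    intro e
    simp only [chunksFrom, List.length_cons, List.range_succ_eq_map, List.map_cons,
      List.map_map, ih (e + max 0 d)]
    congr 1
    · simp [sumMax, sumMax_cons]
    · apply List.map_congr_left
      intro j _
      simp only [Function.comp, List.take_succ_cons, sumMax_cons]
      ring_nf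

theorem offsetsFrom_length (e : Int) (ds : List Int) : (offsetsFrom e ds).length = ds.length := by
  induction ds generalizing e with
  | nil => rfl
  | cons d ds ih => simp [offsetsFrom, ih]

theorem offsetsFrom_get (ds : List Int) : ∀ (e : Int) (j : Nat) (hj : j < ds.length),
    (offsetsFrom e ds)[j]'(by rw [offsetsFrom_length]; exact hj) = e + sumMax (ds.take (j + 1)) := by
  induction ds with
  | nil => intro e j hj; simp at hj
  | cons d ds ih =>
    intro e j hj
    cases j with
    | zero => simp [offsetsFrom, sumMax_cons, sumMax]
    | succ j =>
      simp only [offsetsFrom, List.getElem_cons_succ, List.take_succ_cons, sumMax_cons]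
      rw [ih (e + max 0 d) j (by simpa using hj)]
      ring_nf

/-- The inner loop of A: appends `range e (e + max 0 k)` to slot `m`, advances the counter. -/
theorem innerA (k : Int) (d : List (List Int)) (m : Nat) (e : Int) (hm : m < d.length) :
    (PySem.List.pyRange 0 k 1).foldl
        (fun (st : List (List Int) × Int) _ =>
          (PySem.List.pySetD st.1 (m : Int) (PySem.List.pyGetD st.1 (m : Int) [] ++ [st.2]), st.2 + 1))
        (d, e)
      = (d.set m ((d.getD m []) ++ PySem.List.pyRange e (e + max 0 k) 1), e + max 0 k) := by
  by_cases hk : k ≤ 0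
  · rw [max_eq_left hk, PySem.List.pyRange_one_eq_nil (a := (0 : Int)) (b := k) (by omega),
      PySem.List.pyRange_one_eq_nil (a := e) (b := e + 0) (by omega)]
    simp [List.foldl, List.getElem?_eq_getElem hm, List.set_getElem_self]
  · push_neg at hk
    have hk' : k = ((k.toNat : Nat) : Int) := by omega
    rw [hk']
    clear hk hk'
    generalize k.toNat = kn
    induction kn generalizing d e with
    | zero =>
      have h0 : PySem.List.pyRange e (e + max 0 ((0 : Nat) : Int)) 1 = [] := by
        rw [PySem.List.pyRange_one_eq_nil (by simp)]
      rw [PySem.List.pyRange_one_eq_nil (a := (0 : Int)) (b := ((0 : Nat) : Int)) (by omega), h0]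
      simp [List.foldl, List.getElem?_eq_getElem hm, List.set_getElem_self]
    | succ kn ih =>
      have h1 : ((kn + 1 : Nat) : Int) = (kn : Int) + 1 := by push_cast; ring
      rw [h1, PySem.List.pyRange_one_succ_right (a := (0 : Int)) (b := (kn : Int)) (by omega), List.foldl_append]
      rw [ih d e hm]
      simp only [List.foldl_cons, List.foldl_nil]
      have hmax1 : max 0 ((kn : Int)) = (kn : Int) := by omega
      have hmax2 : max 0 ((kn : Int) + 1) = (kn : Int) + 1 := by omega
      rw [hmax1, hmax2]
      have hlen : m < (d.set m ((d.getD m []) ++ PySem.List.pyRange e (e + kn) 1)).length := by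
        simpa using hm
      simp only [PySem.List.pySetD_natCast, PySem.List.pyGetD_natCast]
      rw [List.getD_eq_getElem _ [] hlen, List.getElem_set_self (h := hlen), List.set_set]
      have h2 : e + ((kn : Int) + 1) = (e + (kn : Int)) + 1 := by ring
      rw [h2, PySem.List.pyRange_one_succ_right (a := e) (b := e + (kn : Int)) (by omega)]
      simp only [Prod.mk.injEq]
      exact ⟨by rw [List.append_assoc], trivial⟩

/-- The outer loop of A, over the index suffix `[a, N)`. -/
theorem outerA (vd : List Int) (N : Nat) (hN : N ≤ vd.length) :
    ∀ (fuel a : Nat), fuel = N - a → a ≤ N → ∀ (done : List (List Int)) (e : Int), done.length = a →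
    (PySem.List.pyRange (a : Int) (N : Int) 1).foldl
        (fun (st : List (List Int) × Int) i =>
          (PySem.List.pyRange 0 (PySem.List.pyGetD vd i 0) 1).foldl
            (fun st _ =>
              (PySem.List.pySetD st.1 i (PySem.List.pyGetD st.1 i [] ++ [st.2]), st.2 + 1))
            st)
        (done ++ List.replicate (N - a) [], e)
      = (done ++ chunksFrom e ((vd.take N).drop a), e + sumMax ((vd.take N).drop a)) := by
  intro fuel
  induction fuel with
  | zero =>
    intro a hfa ha done e hdone
    have haN : a = N := by omega
    subst haN
    rw [PySem.List.pyRange_one_eq_nil (by omega)]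
    have hle : (vd.take a).length ≤ a := by simp
    simp [List.drop_eq_nil_of_le hle, chunksFrom, sumMax]
  | succ fuel ih =>
    intro a hfa ha done e hdone
    have haN : a < N := by omega
    rw [PySem.List.pyRange_one_cons (by exact_mod_cast haN), List.foldl_cons]
    have hav : a < vd.length := by omega
    have hget : PySem.List.pyGetD vd (a : Int) 0 = vd[a] := by
      rw [PySem.List.pyGetD_natCast]; exact List.getD_eq_getElem vd 0 hav
    have hrep : N - a = (N - (a + 1)) + 1 := by omega
    have hd0 : done ++ List.replicate (N - a) ([] : List Int)
        = done ++ ([] : List Int) :: List.replicate (N - (a + 1)) [] := by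
      rw [hrep]; rfl
    rw [hd0, hget]
    have hmlen : a < (done ++ ([] : List Int) :: List.replicate (N - (a + 1)) []).length := by
      simp [← hdone]
    rw [innerA (vd[a]) _ a e hmlen]
    have hgd : (done ++ ([] : List Int) :: List.replicate (N - (a + 1)) []).getD a [] = [] := by
      subst hdone
      rw [List.getD_eq_getElem _ [] hmlen, List.getElem_append_right (le_refl _)]
      simp
    rw [hgd, List.nil_append]
    have hset : (done ++ ([] : List Int) :: List.replicate (N - (a + 1)) []).set a
          (PySem.List.pyRange e (e + max 0 vd[a]) 1)
        = (done ++ [PySem.List.pyRange e (e + max 0 vd[a]) 1]) ++ List.replicate (N - (a + 1)) [] := by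
      subst hdone
      rw [List.set_append, if_neg (by omega)]
      simp
    rw [hset]
    have h1 : ((a : Int) + 1) = ((a + 1 : Nat) : Int) := by push_cast; ring
    rw [h1, ih (a + 1) (by omega) (by omega) _ _ (by simp [← hdone])]
    have hdrop : (vd.take N).drop a = vd[a] :: (vd.take N).drop (a + 1) := by
      rw [List.drop_eq_getElem_cons (by simp [min_eq_left hN]; omega)]
      congr 1
      exact List.getElem_take
    rw [hdrop]
    simp only [chunksFrom, sumMax_cons, Prod.mk.injEq]
    constructor
    · simp [List.append_assoc]
    · ring

/-- The offset-building loop of B, over the index suffix `[a, N)`. -/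
theorem offsB (vd : List Int) (N : Nat) (hN : N ≤ vd.length) :
    ∀ (fuel a : Nat), fuel = N - a → a ≤ N → ∀ (pre : List Int) (e : Int) (x : List Int),
    pre = x ++ [e] →
    (PySem.List.pyRange (a : Int) (N : Int) 1).foldl
        (fun (offs : List Int) i =>
          offs ++ [PySem.List.pyGetD offs (-1) 0 + max 0 (PySem.List.pyGetD vd i 0)])
        pre
      = pre ++ offsetsFrom e ((vd.take N).drop a) := by
  intro fuel
  induction fuel with
  | zero =>
    intro a hfa ha pre e x hpre
    have haN : a = N := by omega
    subst haN
    rw [PySem.List.pyRange_one_eq_nil (by omega)]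
    have hle : (vd.take a).length ≤ a := by simp
    simp [List.drop_eq_nil_of_le hle, offsetsFrom]
  | succ fuel ih =>
    intro a hfa ha pre e x hpre
    have haN : a < N := by omega
    have hav : a < vd.length := by omega
    rw [PySem.List.pyRange_one_cons (by exact_mod_cast haN), List.foldl_cons]
    have hget : PySem.List.pyGetD vd (a : Int) 0 = vd[a] := by
      rw [PySem.List.pyGetD_natCast]; exact List.getD_eq_getElem vd 0 hav
    have hlast : PySem.List.pyGetD pre (-1) 0 = e := by
      rw [hpre]; exact PySem.List.pyGetD_neg_one_append_singleton x e 0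
    rw [hget, hlast]
    have h1 : ((a : Int) + 1) = ((a + 1 : Nat) : Int) := by push_cast; ring
    rw [h1, ih (a + 1) (by omega) (by omega) (pre ++ [e + max 0 vd[a]]) (e + max 0 vd[a])
      pre rfl]
    have hdrop : (vd.take N).drop a = vd[a] :: (vd.take N).drop (a + 1) := by
      rw [List.drop_eq_getElem_cons (by simp [min_eq_left hN]; omega)]
      congr 1
      exact List.getElem_take
    rw [hdrop]
    simp [offsetsFrom, List.append_assoc]

/-- Indexing into B's offset table. -/
theorem O_get (ds : List Int) (e : Int) (j : Nat) (hj : j ≤ ds.length) :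
    PySem.List.pyGetD (e :: offsetsFrom e ds) ((j : Nat) : Int) 0 = e + sumMax (ds.take j) := by
  rw [PySem.List.pyGetD_natCast]
  cases j with
  | zero => simp [sumMax]
  | succ k =>
    rw [List.getD_cons_succ]
    rw [List.getD_eq_getElem _ 0 (by rw [offsetsFrom_length]; omega)]
    exact offsetsFrom_get ds e k (by omega)

theorem main_eq (n : Int) (var_degrees : List Int)
    (hpre : Pre_calculate_edges_CN n var_degrees) :
    calculate_edges_CN n var_degrees = calculate_edges_CN_alt n var_degrees := by
  by_cases hn : 0 ≤ n
  · -- 0 ≤ n ≤ length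
    have hN : n = ((n.toNat : Nat) : Int) := by omega
    set N := n.toNat with hNdef
    have hNlen : N ≤ var_degrees.length := by
      have := hpre hn; omega
    set ds := var_degrees.take N with hds
    have hdslen : ds.length = N := by simp [hds, min_eq_left hNlen]
    -- A side
    have hA : calculate_edges_CN n var_degrees = chunksFrom 0 ds := by
      unfold calculate_edges_CN
      rw [hN]
      have hd0 : (PySem.List.pyRange 0 (N : Int) 1).map (fun _ => ([] : List Int))
          = List.replicate N [] := by
        rw [List.map_const', PySem.List.length_pyRange_one]
        simp
      simp only [hd0]
      have := outerA var_degrees N hNlen N 0 (by omega) (by omega) [] 0 rfl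
      simp only [Nat.cast_zero, Nat.sub_zero, List.nil_append, List.drop_zero] at this
      rw [this]
    -- B side
    have hB : calculate_edges_CN_alt n var_degrees = chunksFrom 0 ds := by
      unfold calculate_edges_CN_alt
      rw [hN]
      have hoffs := offsB var_degrees N hNlen N 0 (by omega) (by omega) [0] 0 [] rfl
      simp only [Nat.cast_zero, List.drop_zero] at hoffs
      rw [hoffs]
      have hO : ([0] : List Int) ++ offsetsFrom 0 ds = (0 : Int) :: offsetsFrom 0 ds := rfl
      rw [hO]
      rw [chunksFrom_eq_map, hdslen]
      rw [PySem.List.pyRange_one]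
      simp only [sub_zero, List.map_map]
      have hNN : ((N : Int)).toNat = N := by omega
      rw [hNN]
      apply List.map_congr_left
      intro j hj
      have hjN : j < N := List.mem_range.mp hj
      simp only [Function.comp]
      have e2 : (0 : Int) + (j : Int) + 1 = ((j + 1 : Nat) : Int) := by push_cast; ring
      have e1 : (0 : Int) + (j : Int) = ((j : Nat) : Int) := by ring
      rw [e2, e1, O_get ds 0 j (by omega), O_get ds 0 (j + 1) (by omega)]
    rw [hA, hB]
  · -- n < 0: both loops are empty
    push_neg at hn
    unfold calculate_edges_CN calculate_edges_CN_alt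
    rw [PySem.List.pyRange_one_eq_nil (by omega)]
    simp

-- ===== VERDICT (by name: the statement is the Claim_ definition above) =====
theorem calculate_edges_CN_spec : Claim_equal_calculate_edges_CN := by
  intro n vd _ hpre
  unfold Spec_calculate_edges_CN
  exact main_eq n vd hpre
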